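-- pv_equiv track=rewrite | github.com/menelly/adaptive_interpreter | utils/clinvar_bulk_extractor.py | _select_best_hgvs
-- ===== SOURCE A (Python) =====
-- from typing import Dict, List, Optional, Set
--
-- def _select_best_hgvs(hgvs_list: List[str]) -> Optional[str]:
--     """Select the best HGVS notation for ML training"""
--     if not hgvs_list:
--         return None
--
--     # Prefer protein changes (p.) over cDNA (c.) over genomic (g.)
--     protein_hgvs = [h for h in hgvs_list if 'p.' in h]
--     if protein_hgvs:
--         return protein_hgvs[0]
--
--     cdna_hgvs = [h for h in hgvs_list if 'c.' in h]
--     if cdna_hgvs: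
--         return cdna_hgvs[0]
--
--     # Return first available
--     return hgvs_list[0]
-- ===== SOURCE B (Python) =====
-- from typing import List, Optional
--
-- def _select_best_hgvs(hgvs_list: List[str]) -> Optional[str]:
--     """Select the best HGVS notation for ML training (single pass)."""
--     if not hgvs_list:
--         return None
--     first_cdna = None
--     for h in hgvs_list:
--         if 'p.' in h:
--             return h
--         if first_cdna is None and 'c.' in h:
--             first_cdna = h
--     return first_cdna if first_cdna is not None else hgvs_list[0]
-- ===== Notes on version B (the rewrite author's own statement) =====
-- stated objective: alternative
-- what changed: Replaced the two list comprehensions (full scans building protein/cDNA lists) with one single-pass loop that returns the first protein match immediately and tracks the first cDNA match in a variable, falling back to the first element.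
import Mathlib
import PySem

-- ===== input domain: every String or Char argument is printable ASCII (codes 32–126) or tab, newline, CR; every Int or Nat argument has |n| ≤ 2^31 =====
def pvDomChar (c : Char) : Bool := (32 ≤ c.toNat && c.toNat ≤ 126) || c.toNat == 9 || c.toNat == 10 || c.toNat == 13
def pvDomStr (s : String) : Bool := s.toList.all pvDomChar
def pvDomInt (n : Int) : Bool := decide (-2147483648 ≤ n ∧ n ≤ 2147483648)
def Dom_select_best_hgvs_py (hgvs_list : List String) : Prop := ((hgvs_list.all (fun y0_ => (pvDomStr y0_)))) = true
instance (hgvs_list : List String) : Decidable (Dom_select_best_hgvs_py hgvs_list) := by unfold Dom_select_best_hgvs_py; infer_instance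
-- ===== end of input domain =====

-- B replaces A's two filtering comprehensions with one single-pass loop tracking the first cDNA match (alternative decomposition, same cost).


-- ===== PORT A =====
def select_best_hgvs_py (hgvs_list : List String) : Option String :=
  if hgvs_list.isEmpty then none
  else
    let protein_hgvs := hgvs_list.filter (fun h => PySem.Str.isIn "p." h)
    if !protein_hgvs.isEmpty then protein_hgvs.head?
    else
      let cdna_hgvs := hgvs_list.filter (fun h => PySem.Str.isIn "c." h)
      if !cdna_hgvs.isEmpty then cdna_hgvs.head?
      else hgvs_list.head?

-- ===== PORT B =====
-- single-pass loop: early return on first 'p.' match, remember first 'c.' match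
def selGo (first : String) : List String → Option String → Option String
  | [], first_cdna => some (first_cdna.getD first)
  | h :: t, first_cdna =>
    if PySem.Str.isIn "p." h then some h
    else selGo first t (if first_cdna.isNone && PySem.Str.isIn "c." h then some h else first_cdna)

def select_best_hgvs_py_alt (hgvs_list : List String) : Option String :=
  match hgvs_list with
  | [] => none
  | h :: t => selGo h (h :: t) none

-- ===== PRECONDITION & SPEC =====
def Spec_select_best_hgvs_py (hgvs_list : List String) (out : Option String) : Prop := out = select_best_hgvs_py_alt hgvs_list
instance (hgvs_list : List String) (out : Option String) : Decidable (Spec_select_best_hgvs_py hgvs_list out) := by unfold Spec_select_best_hgvs_py; infer_instance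

-- ===== CLAIM (what is proved, stated in full; the proofs are below) =====
def Claim_equal_select_best_hgvs_py : Prop := ∀ (hgvs_list : List String), Dom_select_best_hgvs_py hgvs_list → Spec_select_best_hgvs_py hgvs_list (select_best_hgvs_py hgvs_list)

-- ===== LEMMAS AND PROOFS =====

-- loop invariant: selGo computes "first protein, else remembered/first cDNA, else the fallback"
theorem selGo_spec (l : List String) : ∀ (first : String) (cdna : Option String),
    selGo first l cdna =
      match l.filter (fun h => PySem.Str.isIn "p." h) with
      | x :: _ => some x
      | [] =>
        match cdna with
        | some c => some c
        | none =>
          match l.filter (fun h => PySem.Str.isIn "c." h) with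
          | x :: _ => some x
          | [] => some first := by
  induction l with
  | nil => intro first cdna; cases cdna <;> simp [selGo]
  | cons h t ih =>
    intro first cdna
    by_cases hp : PySem.Chars.isIn ['p', '.'] h.toList = true
    · simp [selGo, hp, List.filter_cons]
    · cases cdna with
      | some c =>
        simp [selGo, hp, List.filter_cons, ih]
      | none =>
        by_cases hc : PySem.Chars.isIn ['c', '.'] h.toList = true
        · simp [selGo, hp, hc, List.filter_cons, ih]
        · simp [selGo, hp, hc, List.filter_cons, ih]

-- ===== VERDICT (by name: the statement is the Claim_ definition above) =====
theorem select_best_hgvs_py_spec : Claim_equal_select_best_hgvs_py := by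
  intro l _
  unfold Spec_select_best_hgvs_py
  cases l with
  | nil => rfl
  | cons h t =>
    show select_best_hgvs_py (h :: t) = select_best_hgvs_py_alt (h :: t)
    rw [select_best_hgvs_py_alt, selGo_spec]
    simp only [select_best_hgvs_py, List.isEmpty_cons, if_false, Bool.false_eq_true]
    cases hP : (h :: t).filter (fun x => PySem.Chars.isIn ['p', '.'] x.toList) with
    | cons a l' => simp [hP]
    | nil =>
      cases hC : (h :: t).filter (fun x => PySem.Chars.isIn ['c', '.'] x.toList) with
      | cons a l' => simp [hP, hC]
      | nil => simp [hP, hC]
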